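-- pv_equiv track=rewrite | github.com/SebDiyx/aoc-2024 | src/day09/main.py | get_first_possible_slot
-- ===== SOURCE A (Python) =====
-- def get_first_possible_slot(disk: list[int | None], file_length: int):
--     empty_start = None
--     empty_length = 0
--     for idx, val in enumerate(disk):
--         if val is None:
--             empty_length += 1
--             if empty_start is None:
--                 empty_start = idx
--
--             if empty_length == file_length:
--                 return empty_start
--
--         else:
--             empty_start = None
--             empty_length = 0
--
--     return None
-- ===== SOURCE B (Python) =====
-- def get_first_possible_slot(disk: list[int | None], file_length: int):
--     if file_length <= 0:
--         return None
--     # Decompose the disk into maximal runs of (start, is_empty, length),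
--     # then return the start of the first empty run long enough.
--     runs = []
--     i = 0
--     n = len(disk)
--     while i < n:
--         j = i
--         while j < n and (disk[j] is None) == (disk[i] is None):
--             j += 1
--         runs.append((i, disk[i] is None, j - i))
--         i = j
--     for start, is_empty, length in runs:
--         if is_empty and length >= file_length:
--             return start
--     return None
-- ===== Notes on version B (the rewrite author's own statement) =====
-- stated objective: alternative
-- what changed: B first decomposes the disk into maximal (start, is_empty, length) runs in one pass and then scans the run list for the first empty run of sufficient length, with an explicit guard returning None for file_length <= 0, instead of A's single stateful scan tracking a current-gap start and counter.
import Mathlib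
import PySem

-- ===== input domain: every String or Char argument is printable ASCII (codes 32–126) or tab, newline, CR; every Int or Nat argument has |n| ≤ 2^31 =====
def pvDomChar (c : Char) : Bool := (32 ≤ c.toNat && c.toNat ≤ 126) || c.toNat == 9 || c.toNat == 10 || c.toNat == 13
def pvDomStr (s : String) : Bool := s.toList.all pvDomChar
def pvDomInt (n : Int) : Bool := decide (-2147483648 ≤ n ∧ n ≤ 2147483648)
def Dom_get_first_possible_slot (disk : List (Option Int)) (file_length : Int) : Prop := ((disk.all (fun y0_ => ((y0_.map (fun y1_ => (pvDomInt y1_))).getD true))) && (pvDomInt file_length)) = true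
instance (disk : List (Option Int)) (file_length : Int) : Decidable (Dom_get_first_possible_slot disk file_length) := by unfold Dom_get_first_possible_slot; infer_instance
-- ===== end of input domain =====

-- B decomposes the disk into maximal runs and scans the run list; alternative decomposition, same cost.

-- ===== PORT A =====
-- A's loop over enumerate(disk) with state (empty_start, empty_length); branches in source order.
def pvGoA (l : List (Option Int)) (idx : Int) (empty_start : Option Int) (empty_length : Int)
    (file_length : Int) : Option Int :=
  match l with
  | [] => none
  | none :: rest =>
    -- val is None: empty_length += 1; empty_start = empty_start or idx; test == file_length
    if empty_length + 1 = file_length then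
      (match empty_start with | none => some idx | some s => some s)
    else
      pvGoA rest (idx + 1) (match empty_start with | none => some idx | some s => some s)
        (empty_length + 1) file_length
  | some _ :: rest => pvGoA rest (idx + 1) none 0 file_length

def get_first_possible_slot (disk : List (Option Int)) (file_length : Int) : Option Int :=
  pvGoA disk 0 none 0 file_length

-- ===== PORT B =====
-- inner `while j < n and (disk[j] is None) == (disk[i] is None)`: run length after the head
def pvTakeRun (b : Bool) (l : List (Option Int)) : Nat :=
  match l with
  | [] => 0
  | v :: rest => if v.isNone = b then pvTakeRun b rest + 1 else 0

-- outer while loop building runs = [(start, is_empty, length), ...]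
def pvBuildRuns (l : List (Option Int)) (i : Int) : List (Int × Bool × Int) :=
  match l with
  | [] => []
  | v :: rest =>
    (i, v.isNone, ((pvTakeRun v.isNone rest : Int) + 1)) ::
      pvBuildRuns (rest.drop (pvTakeRun v.isNone rest)) (i + (pvTakeRun v.isNone rest : Int) + 1)
termination_by l.length
decreasing_by simp

-- final for-loop over runs
def pvFindRun (file_length : Int) (runs : List (Int × Bool × Int)) : Option Int :=
  match runs with
  | [] => none
  | (start, is_empty, len) :: rest =>
    if is_empty = true ∧ file_length ≤ len then some start
    else pvFindRun file_length rest

def get_first_possible_slot_alt (disk : List (Option Int)) (file_length : Int) : Option Int :=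
  if file_length ≤ 0 then none
  else pvFindRun file_length (pvBuildRuns disk 0)

-- ===== PRECONDITION & SPEC =====
def Spec_get_first_possible_slot (disk : List (Option Int)) (file_length : Int) (out : Option Int) : Prop := out = get_first_possible_slot_alt disk file_length
instance (disk : List (Option Int)) (file_length : Int) (out : Option Int) : Decidable (Spec_get_first_possible_slot disk file_length out) := by unfold Spec_get_first_possible_slot; infer_instance

-- ===== CLAIM (what is proved, stated in full; the proofs are below) =====
def Claim_equal_get_first_possible_slot : Prop := ∀ (disk : List (Option Int)) (file_length : Int), Dom_get_first_possible_slot disk file_length → Spec_get_first_possible_slot disk file_length (get_first_possible_slot disk file_length)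

-- ===== LEMMAS AND PROOFS =====

theorem pvBuildRuns_nil (i : Int) : pvBuildRuns [] i = [] := by
  rw [pvBuildRuns.eq_def]

theorem pvBuildRuns_cons (v : Option Int) (rest : List (Option Int)) (i : Int) :
    pvBuildRuns (v :: rest) i =
      (i, v.isNone, ((pvTakeRun v.isNone rest : Int) + 1)) ::
        pvBuildRuns (rest.drop (pvTakeRun v.isNone rest)) (i + (pvTakeRun v.isNone rest : Int) + 1) := by
  rw [pvBuildRuns.eq_def]

-- file_length <= 0: A never triggers the equality test (the counter is >= 1 there)
theorem pvGoA_nonpos (fl : Int) (hfl : fl ≤ 0) :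
    ∀ (l : List (Option Int)) (idx : Int) (es : Option Int) (el : Int), 0 ≤ el →
      pvGoA l idx es el fl = none := by
  intro l
  induction l with
  | nil => intro idx es el _; rfl
  | cons v rest ih =>
    intro idx es el hel
    cases v with
    | none =>
      show (if el + 1 = fl then _ else pvGoA rest (idx + 1) _ (el + 1) fl) = none
      rw [if_neg (by omega : ¬ (el + 1 = fl))]
      exact ih _ _ _ (by omega)
    | some x => exact ih (idx + 1) none 0 le_rfl

theorem pvTakeRun_le (b : Bool) (l : List (Option Int)) : pvTakeRun b l ≤ l.length := by
  induction l with
  | nil => simp [pvTakeRun]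
  | cons v rest ih => by_cases h : v.isNone = b <;> simp [pvTakeRun, h] <;> omega

theorem pvTakeRun_take (b : Bool) (l : List (Option Int)) :
    ∀ x ∈ l.take (pvTakeRun b l), x.isNone = b := by
  induction l with
  | nil => simp
  | cons v rest ih =>
    by_cases h : v.isNone = b
    · rw [pvTakeRun, if_pos h, List.take_succ_cons]
      intro x hx
      rcases List.mem_cons.mp hx with h1 | h1
      · rw [h1]; exact h
      · exact ih x h1
    · simp [pvTakeRun, h]

theorem pvTakeRun_drop (b : Bool) (l : List (Option Int)) :
    l.drop (pvTakeRun b l) = [] ∨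
      ∃ y t, l.drop (pvTakeRun b l) = y :: t ∧ y.isNone ≠ b := by
  induction l with
  | nil => simp
  | cons v rest ih =>
    by_cases h : v.isNone = b
    · rw [pvTakeRun, if_pos h, List.drop_succ_cons]
      exact ih
    · exact Or.inr ⟨v, rest, by rw [pvTakeRun, if_neg h]; rfl, h⟩

theorem pvTakeRun_len_take (b : Bool) (l : List (Option Int)) :
    (l.take (pvTakeRun b l)).length = pvTakeRun b l :=
  List.length_take_of_le (pvTakeRun_le _ _)

-- skipping a nonempty block of occupied cells resets A's state
theorem pvGoA_skip_some (fl : Int) :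
    ∀ (run : List (Option Int)), (∀ x ∈ run, x.isNone = false) →
    ∀ (t : List (Option Int)) (idx : Int) (es : Option Int) (el : Int),
      pvGoA (run ++ t) idx es el fl =
        if run = [] then pvGoA t idx es el fl
        else pvGoA t (idx + run.length) none 0 fl := by
  intro run
  induction run with
  | nil => intro _ t idx es el; simp
  | cons v rest ih =>
    intro hall t idx es el
    have hv : v.isNone = false := hall v (List.mem_cons_self ..)
    rw [if_neg (List.cons_ne_nil _ _)]
    cases v with
    | none => simp at hv
    | some x =>
      show pvGoA (rest ++ t) (idx + 1) none 0 fl = _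
      rw [ih (fun y hy => hall y (List.mem_cons_of_mem _ hy)) t (idx + 1) none 0]
      split_ifs with hr
      · subst hr
        norm_num
      · congr 1
        simp only [List.length_cons]
        push_cast
        ring

-- walking a block of empty cells mid-run: return the saved start iff the counter reaches fl inside
theorem pvGoA_nones (fl : Int) :
    ∀ (run : List (Option Int)), (∀ x ∈ run, x = none) →
    ∀ (t : List (Option Int)) (idx s el : Int), el < fl →
      pvGoA (run ++ t) idx (some s) el fl =
        if fl ≤ el + run.length then some s
        else pvGoA t (idx + run.length) (some s) (el + run.length) fl := by
  intro run
  induction run with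
  | nil =>
    intro _ t idx s el h
    rw [List.nil_append, if_neg (by simp only [List.length_nil]; push_cast; omega)]
    norm_num
  | cons v rest ih =>
    intro hall t idx s el hel
    have hv : v = none := hall v (List.mem_cons_self ..)
    subst hv
    rw [List.cons_append,
      show pvGoA (none :: (rest ++ t)) idx (some s) el fl
        = if el + 1 = fl then some s else pvGoA (rest ++ t) (idx + 1) (some s) (el + 1) fl from rfl]
    by_cases heq : el + 1 = fl
    · rw [if_pos heq, if_pos (by simp only [List.length_cons]; push_cast; omega)]
    · rw [if_neg heq,
        ih (fun y hy => hall y (List.mem_cons_of_mem _ hy)) t (idx + 1) s (el + 1) (by omega)]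
      by_cases hstop : fl ≤ el + 1 + (rest.length : Int)
      · rw [if_pos hstop, if_pos (by simp only [List.length_cons]; push_cast; omega)]
      · rw [if_neg hstop, if_neg (by simp only [List.length_cons]; push_cast; omega)]
        congr 1 <;> simp only [List.length_cons] <;> push_cast <;> ring

-- main induction: A's scan from a fresh state equals B's scan of the run list
theorem pvGoA_eq_runs (fl : Int) (hfl : 1 ≤ fl) :
    ∀ (n : Nat) (l : List (Option Int)), l.length ≤ n → ∀ (idx : Int),
      pvGoA l idx none 0 fl = pvFindRun fl (pvBuildRuns l idx) := by
  intro n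
  induction n with
  | zero =>
    intro l hl idx
    have : l = [] := List.eq_nil_of_length_eq_zero (by omega)
    subst this
    rw [pvBuildRuns_nil]; rfl
  | succ m ih =>
    intro l hl idx
    cases l with
    | nil => rw [pvBuildRuns_nil]; rfl
    | cons v rest =>
      cases v with
      | some x =>
        -- occupied head: first run is occupied, both sides skip it
        have hA : pvGoA (some x :: rest) idx none 0 fl
            = pvGoA (rest.drop (pvTakeRun false rest)) (idx + (pvTakeRun false rest : Int) + 1) none 0 fl := by
          show pvGoA rest (idx + 1) none 0 fl = _
          conv_lhs => rw [(List.take_append_drop (pvTakeRun false rest) rest).symm]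
          rw [pvGoA_skip_some fl _ (pvTakeRun_take false rest) _ (idx + 1) none 0]
          split_ifs with h
          · have hk0 : pvTakeRun false rest = 0 := by
              have := pvTakeRun_len_take false rest
              rw [h] at this
              simpa using this.symm
            rw [hk0]
            norm_num
          · rw [pvTakeRun_len_take]
            congr 1
            ring
        rw [hA, pvBuildRuns_cons, pvFindRun, Option.isNone_some,
          if_neg (by simp)]
        exact ih (rest.drop (pvTakeRun false rest)) (by simp at hl ⊢; omega) _
      | none =>
        rw [pvBuildRuns_cons, Option.isNone_none, pvFindRun, pvGoA]
        by_cases h1 : (0 : Int) + 1 = fl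
        · rw [if_pos h1, if_pos ⟨rfl, by have := Int.natCast_nonneg (pvTakeRun true rest); omega⟩]
        · rw [if_neg h1]
          have h1' : (1 : Int) < fl := by omega
          rw [show pvGoA rest (idx + 1) (some idx) (0 + 1) fl
              = pvGoA (rest.take (pvTakeRun true rest) ++ rest.drop (pvTakeRun true rest))
                  (idx + 1) (some idx) 1 fl by
            rw [List.take_append_drop]; norm_num]
          have hallnone : ∀ y ∈ rest.take (pvTakeRun true rest), y = none := by
            intro y hy
            have := pvTakeRun_take true rest y hy
            cases y
            · rfl
            · simp at this
          rw [pvGoA_nones fl _ hallnone _ (idx + 1) idx 1 h1', pvTakeRun_len_take]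
          by_cases h2 : fl ≤ 1 + (pvTakeRun true rest : Int)
          · rw [if_pos h2, if_pos ⟨rfl, by omega⟩]
          · rw [if_neg h2, if_neg (by simp; omega)]
            -- tail is empty or starts with an occupied cell; A resets state either way
            have hA2 : pvGoA (rest.drop (pvTakeRun true rest)) (idx + 1 + (pvTakeRun true rest : Int))
                  (some idx) (1 + (pvTakeRun true rest : Int)) fl
                = pvGoA (rest.drop (pvTakeRun true rest)) (idx + (pvTakeRun true rest : Int) + 1) none 0 fl := by
              rcases pvTakeRun_drop true rest with he | ⟨y, t, hyt, hy⟩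
              · rw [he]; rfl
              · cases y with
                | none => simp at hy
                | some z =>
                  rw [hyt]
                  show pvGoA t _ none 0 fl = pvGoA t _ none 0 fl
                  congr 1
                  ring
            rw [hA2]
            exact ih (rest.drop (pvTakeRun true rest)) (by simp at hl ⊢; omega) _

-- ===== VERDICT (by name: the statement is the Claim_ definition above) =====
theorem get_first_possible_slot_spec : Claim_equal_get_first_possible_slot := by
  intro disk fl _
  unfold Spec_get_first_possible_slot get_first_possible_slot get_first_possible_slot_alt
  by_cases h : fl ≤ 0
  · rw [if_pos h]; exact pvGoA_nonpos fl h disk 0 none 0 le_rfl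
  · rw [if_neg h]
    exact pvGoA_eq_runs fl (by omega) disk.length disk le_rfl 0
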